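-- pv_equiv track=rewrite | github.com/sqmq13/pm-data-infra | pm_arb/reconcile.py | infer_tick_micro
-- ===== SOURCE A (Python) =====
-- def infer_tick_micro(asks: list[tuple[int, int]]) -> int | None:
--     prices = sorted({price for price, _ in asks})
--     if len(prices) < 2:
--         return None
--     diffs = [b - a for a, b in zip(prices, prices[1:]) if b - a > 0]
--     if not diffs:
--         return None
--     return min(diffs)
-- ===== SOURCE B (Python) =====
-- def infer_tick_micro(asks: list[tuple[int, int]]) -> int | None:
--     # All-pairs scan over the distinct prices: no sort, running minimum of |a - b|.
--     uniq = []
--     for price, _ in asks: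
--         if price not in uniq:
--             uniq.append(price)
--     if len(uniq) < 2:
--         return None
--     best = None
--     rest = uniq
--     while rest:
--         a, rest = rest[0], rest[1:]
--         for b in rest:
--             d = abs(a - b)
--             if best is None or d < best:
--                 best = d
--     return best
-- ===== Notes on version B (the rewrite author's own statement) =====
-- stated objective: alternative
-- what changed: A sorts the distinct prices and takes the minimum positive adjacent gap; B never sorts: it dedupes in first-occurrence order and does an all-pairs scan keeping a running minimum of absolute differences.
import Mathlib
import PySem

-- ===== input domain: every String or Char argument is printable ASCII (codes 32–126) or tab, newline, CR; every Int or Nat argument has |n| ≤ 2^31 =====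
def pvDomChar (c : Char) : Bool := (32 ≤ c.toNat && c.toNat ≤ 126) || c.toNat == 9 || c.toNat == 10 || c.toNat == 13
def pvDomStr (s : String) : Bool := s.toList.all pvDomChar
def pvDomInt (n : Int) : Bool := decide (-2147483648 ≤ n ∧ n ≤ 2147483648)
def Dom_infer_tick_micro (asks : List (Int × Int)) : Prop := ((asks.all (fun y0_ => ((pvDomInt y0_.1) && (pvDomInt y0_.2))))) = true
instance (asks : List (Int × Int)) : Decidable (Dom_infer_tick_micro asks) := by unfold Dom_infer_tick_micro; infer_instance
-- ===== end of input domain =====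

-- B replaces A's sort-then-adjacent-gap strategy by an all-pairs running-minimum scan over the
-- distinct prices (objective: alternative — same result, genuinely different algorithm, no sort).

-- ===== PORT A =====
def infer_tick_micro (asks : List (Int × Int)) : Option Int :=
  let prices := PySem.List.sorted (PySem.Set.ofList (asks.map (fun p => p.1))) (fun x => x) false
  if prices.length < 2 then none
  else
    let diffs := ((prices.zip (prices.drop 1)).map (fun ab => ab.2 - ab.1)).filter (fun d => decide (0 < d))
    if diffs = [] then none
    else PySem.List.min? diffs (fun x => x)

-- ===== PORT B =====
-- the while-loop of Source B: peel off the head, scan the rest, recurse on the rest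
def pairScan : List Int → Option Int → Option Int
  | [], best => best
  | a :: rest, best =>
      pairScan rest (rest.foldl (fun best b =>
        let d := |a - b|
        match best with
        | none => some d
        | some m => if d < m then some d else some m) best)

def infer_tick_micro_alt (asks : List (Int × Int)) : Option Int :=
  let uniq := asks.foldl (fun u p => if p.1 ∈ u then u else u ++ [p.1]) []
  if uniq.length < 2 then none
  else pairScan uniq none

-- ===== PRECONDITION & SPEC =====
def Spec_infer_tick_micro (asks : List (Int × Int)) (out : Option Int) : Prop := out = infer_tick_micro_alt asks
instance (asks : List (Int × Int)) (out : Option Int) : Decidable (Spec_infer_tick_micro asks out) := by unfold Spec_infer_tick_micro; infer_instance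

-- ===== CLAIM (what is proved, stated in full; the proofs are below) =====
def Claim_equal_infer_tick_micro : Prop := ∀ (asks : List (Int × Int)), Dom_infer_tick_micro asks → Spec_infer_tick_micro asks (infer_tick_micro asks)

-- ===== LEMMAS AND PROOFS =====

-- the list of all pairwise absolute differences B's scan minimises over
def pl : List Int → List Int
  | [] => []
  | a :: rest => rest.map (fun b => |a - b|) ++ pl rest

-- the list of adjacent differences A minimises over
def adjD : List Int → List Int
  | [] => []
  | [_] => []
  | a :: b :: t => (b - a) :: adjD (b :: t)

lemma adjD_eq (P : List Int) :
    adjD P = (P.zip (P.drop 1)).map (fun ab => ab.2 - ab.1) := by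
  match P with
  | [] => rfl
  | [_] => rfl
  | a :: b :: t => simp [adjD, adjD_eq (b :: t)]

def omin (o : Option Int) (d : Int) : Option Int :=
  some (match o with | none => d | some m => min m d)

lemma foldl_omin_some (t : List Int) (m : Int) :
    t.foldl omin (some m) = some (t.foldl min m) := by
  induction t generalizing m with
  | nil => rfl
  | cons x s ih => simp [List.foldl_cons, omin, ih]

lemma scan_step (a : Int) (rest : List Int) (best : Option Int) :
    (rest.foldl (fun best b =>
        let d := |a - b|
        match best with
        | none => some d
        | some m => if d < m then some d else some m) best) =
    (rest.map (fun b => |a - b|)).foldl omin best := by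
  induction rest generalizing best with
  | nil => rfl
  | cons x s ih2 =>
    simp only [List.foldl_cons, List.map_cons]
    rw [ih2]
    congr 1
    cases best with
    | none => rfl
    | some m =>
      simp only [omin]
      by_cases h : |a - x| < m
      · simp [h, min_eq_right (le_of_lt h)]
      · simp [h, min_eq_left (by omega : m ≤ |a - x|)]

lemma pairScan_fold (l : List Int) (best : Option Int) :
    pairScan l best = (pl l).foldl omin best := by
  induction l generalizing best with
  | nil => rfl
  | cons a rest ih =>
    show pairScan rest _ = _
    rw [scan_step, ih]
    simp [pl, List.foldl_append]

lemma pairScan_min? (l : List Int) :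
    pairScan l none = PySem.List.min? (pl l) (fun x => x) := by
  rw [pairScan_fold]
  cases h : pl l with
  | nil => rfl
  | cons x t =>
    simp only [List.foldl_cons, PySem.List.min?_id_cons]
    have : omin none x = some x := rfl
    rw [this, foldl_omin_some]

lemma mem_pl_of (l : List Int) (a b : Int) (ha : a ∈ l) (hb : b ∈ l) (hab : a ≠ b) :
    |a - b| ∈ pl l := by
  induction l with
  | nil => cases ha
  | cons c t ih =>
    simp only [pl, List.mem_append, List.mem_map]
    rcases List.mem_cons.1 ha with rfl | ha'
    · rcases List.mem_cons.1 hb with rfl | hb'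
      · exact absurd rfl hab
      · exact Or.inl ⟨b, hb', rfl⟩
    · rcases List.mem_cons.1 hb with rfl | hb'
      · exact Or.inl ⟨a, ha', by rw [abs_sub_comm]⟩
      · exact Or.inr (ih ha' hb')

lemma pl_mem (l : List Int) (hn : l.Nodup) (x : Int) (hx : x ∈ pl l) :
    ∃ a b, a ∈ l ∧ b ∈ l ∧ a ≠ b ∧ x = |a - b| := by
  induction l with
  | nil => cases hx
  | cons c t ih =>
    rcases List.nodup_cons.1 hn with ⟨hc, hnt⟩
    rcases List.mem_append.1 hx with hm | hm
    · rcases List.mem_map.1 hm with ⟨b, hb, rfl⟩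
      exact ⟨c, b, List.mem_cons_self, List.mem_cons_of_mem _ hb,
        fun h => hc (h ▸ hb), rfl⟩
    · rcases ih hnt hm with ⟨a, b, ha, hb, hab, rfl⟩
      exact ⟨a, b, List.mem_cons_of_mem _ ha, List.mem_cons_of_mem _ hb, hab, rfl⟩

lemma adjD_mem (P : List Int) (hs : P.Pairwise (· < ·)) (x : Int) (hx : x ∈ adjD P) :
    ∃ a b, a ∈ P ∧ b ∈ P ∧ a < b ∧ x = b - a := by
  match P, hs, hx with
  | a :: b :: t, hs, hx =>
    rcases List.mem_cons.1 hx with rfl | hx'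
    · exact ⟨a, b, List.mem_cons_self, List.mem_cons_of_mem _ List.mem_cons_self,
        (List.pairwise_cons.1 hs).1 b List.mem_cons_self, rfl⟩
    · rcases adjD_mem (b :: t) (List.pairwise_cons.1 hs).2 x hx' with ⟨p, q, hp, hq, hpq, rfl⟩
      exact ⟨p, q, List.mem_cons_of_mem _ hp, List.mem_cons_of_mem _ hq, hpq, rfl⟩

lemma adjD_le (P : List Int) (hs : P.Pairwise (· < ·)) (x y : Int)
    (hx : x ∈ P) (hy : y ∈ P) (hxy : x < y) :
    ∃ g ∈ adjD P, g ≤ y - x := by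
  match P, hs, hx with
  | p :: rest, hs, hx =>
    rcases List.pairwise_cons.1 hs with ⟨hp, hrest⟩
    rcases List.mem_cons.1 hx with rfl | hx'
    · -- x is the head; y must be in rest
      have hy' : y ∈ rest := by
        rcases List.mem_cons.1 hy with rfl | h
        · exact absurd hxy (lt_irrefl _)
        · exact h
      match rest, hp, hrest, hy' with
      | r :: t, hp, hrest, hy' =>
        rcases List.mem_cons.1 hy' with rfl | hyt
        · exact ⟨y - x, List.mem_cons_self, le_refl _⟩
        · have hry : r < y := (List.pairwise_cons.1 hrest).1 y hyt
          rcases adjD_le (r :: t) hrest r y List.mem_cons_self hy' hry with ⟨g, hg, hle⟩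
          refine ⟨g, List.mem_cons_of_mem _ hg, ?_⟩
          have : x < r := hp r List.mem_cons_self
          omega
    · -- both in rest
      have hy' : y ∈ rest := by
        rcases List.mem_cons.1 hy with rfl | h
        · exact absurd (lt_trans (hp x hx') hxy) (lt_irrefl _)
        · exact h
      rcases adjD_le rest hrest x y hx' hy' hxy with ⟨g, hg, hle⟩
      match rest, hg with
      | r :: t, hg => exact ⟨g, List.mem_cons_of_mem _ hg, hle⟩

-- ===== VERDICT (by name: the statement is the Claim_ definition above) =====
lemma adjD_ne_nil (l : List Int) (h : 2 ≤ l.length) : adjD l ≠ [] := by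
  match l with
  | [] => simp at h
  | [a] => simp at h
  | a :: b :: t => simp [adjD]

lemma pl_ne_nil (l : List Int) (h : 2 ≤ l.length) : pl l ≠ [] := by
  match l with
  | [] => simp at h
  | [a] => simp at h
  | a :: b :: t => simp [pl]

lemma min?_eq_min? (L1 L2 : List Int)
    (h1 : ∀ x ∈ L1, ∃ y ∈ L2, y ≤ x) (h2 : ∀ x ∈ L2, ∃ y ∈ L1, y ≤ x)
    (hne1 : L1 ≠ []) (hne2 : L2 ≠ []) :
    PySem.List.min? L1 (fun x => x) = PySem.List.min? L2 (fun x => x) := by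
  obtain ⟨m1, hm1⟩ : ∃ m1, PySem.List.min? L1 (fun x => x) = some m1 := by
    cases h : PySem.List.min? L1 (fun x => x) with
    | none => exact absurd ((PySem.List.min?_eq_none_iff _ _).1 h) hne1
    | some m => exact ⟨m, rfl⟩
  obtain ⟨m2, hm2⟩ : ∃ m2, PySem.List.min? L2 (fun x => x) = some m2 := by
    cases h : PySem.List.min? L2 (fun x => x) with
    | none => exact absurd ((PySem.List.min?_eq_none_iff _ _).1 h) hne2
    | some m => exact ⟨m, rfl⟩
  rw [hm1, hm2]
  congr 1
  rcases h1 _ (PySem.List.min?_mem hm1) with ⟨y2, hy2, hle2⟩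
  rcases h2 _ (PySem.List.min?_mem hm2) with ⟨y1, hy1, hle1⟩
  have a1 := PySem.List.min?_isMin hm1 y1 hy1
  have a2 := PySem.List.min?_isMin hm2 y2 hy2
  simp only [] at a1 a2
  omega

theorem infer_tick_micro_spec : Claim_equal_infer_tick_micro := by
  intro asks _
  unfold Spec_infer_tick_micro infer_tick_micro infer_tick_micro_alt
  have huniq : asks.foldl (fun u p => if p.1 ∈ u then u else u ++ [p.1]) [] =
      PySem.Set.ofList (asks.map (fun p => p.1)) := by
    rw [PySem.Set.ofList_eq_foldl, List.foldl_map]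
    congr 1
    funext u p
    by_cases h : p.1 ∈ u <;> simp [PySem.Set.add, h]
  rw [huniq]
  set xs := asks.map (fun p => p.1) with hxs
  set u := PySem.Set.ofList xs with hu
  set P := PySem.List.sorted u (fun x => x) false with hP
  have hlen : P.length = u.length := by rw [hP]; exact PySem.List.length_sorted ..
  have hsorted : P.Pairwise (· < ·) := PySem.List.sorted_ofList_pairwise_lt xs
  have hnodup : u.Nodup := PySem.Set.nodup_ofList xs
  have hperm : P.Perm u := PySem.List.sorted_perm ..
  by_cases hlt : u.length < 2
  · simp [hlen, hlt]
  · simp only [hlen, hlt, if_false]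
    have hpos : ((P.zip (P.drop 1)).map (fun ab => ab.2 - ab.1)).filter
        (fun d => decide (0 < d)) = adjD P := by
      rw [← adjD_eq]
      apply List.filter_eq_self.2
      intro d hd
      rcases adjD_mem P hsorted d hd with ⟨a, b, _, _, hab, rfl⟩
      simp
      omega
    rw [hpos]
    have hne : adjD P ≠ [] := adjD_ne_nil P (by omega)
    rw [if_neg hne, pairScan_min?]
    have hplne : pl u ≠ [] := pl_ne_nil u (by omega)
    apply min?_eq_min? _ _ _ _ hne hplne
    · -- every adjacent diff dominates some pairwise abs diff
      intro x hx
      rcases adjD_mem P hsorted x hx with ⟨a, b, ha, hb, hab, rfl⟩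
      refine ⟨|a - b|, mem_pl_of u a b (hperm.mem_iff.1 ha) (hperm.mem_iff.1 hb) (ne_of_lt hab), ?_⟩
      have : |a - b| = b - a := by rw [abs_sub_comm]; exact abs_of_pos (by omega)
      omega
    · -- every pairwise abs diff dominates some adjacent diff
      intro x hx
      rcases pl_mem u hnodup x hx with ⟨a, b, ha, hb, hab, rfl⟩
      rcases lt_or_gt_of_ne hab with h | h
      · rcases adjD_le P hsorted a b (hperm.mem_iff.2 ha) (hperm.mem_iff.2 hb) h with ⟨g, hg, hle⟩
        refine ⟨g, hg, ?_⟩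
        have : |a - b| = b - a := by rw [abs_sub_comm]; exact abs_of_pos (by omega)
        omega
      · rcases adjD_le P hsorted b a (hperm.mem_iff.2 hb) (hperm.mem_iff.2 ha) h with ⟨g, hg, hle⟩
        refine ⟨g, hg, ?_⟩
        have : |a - b| = a - b := abs_of_pos (by omega)
        omega
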